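-- pv_equiv track=rewrite | github.com/mh70cz/mypy | challenges/pybites/bite_189.py | filter_names
-- ===== SOURCE A (Python) =====
-- IGNORE_CHAR = 'b'
--
-- QUIT_CHAR = 'q'
--
-- MAX_NAMES = 5
--
-- def filter_names(names):
--     #filtered_names = []
--     count = 0
--     for name in names:
--         if name[0] in IGNORE_CHAR:
--             continue
--         if any([x.isnumeric() for x in name]):
--             continue
--         if name[0] in QUIT_CHAR:
--             break
--         #if len(filtered_names) == 5:
--         #    break
--         #filtered_names.append(name)
--         if count == MAX_NAMES:
--             break
--         count += 1
--         yield name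
-- ===== SOURCE B (Python) =====
-- IGNORE_CHAR = 'b'
--
-- QUIT_CHAR = 'q'
--
-- MAX_NAMES = 5
--
-- def filter_names(names):
--     def keep(name):
--         return name[0] not in IGNORE_CHAR and not any(x.isnumeric() for x in name)
--
--     # Stage 1: locate the cut point — the index of the first non-filtered quit name.
--     stop = len(names)
--     for i, name in enumerate(names):
--         if keep(name) and name[0] in QUIT_CHAR:
--             stop = i
--             break
--     # Stage 2: filter the prefix before the cut point and cap at MAX_NAMES.
--     yield from [name for name in names[:stop] if keep(name)][:MAX_NAMES]
-- ===== Notes on version B (the rewrite author's own statement) =====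
-- stated objective: alternative
-- what changed: Replaced A's single-pass counter loop with break/continue by a staged computation: a first pass finds the cut index of the first non-filtered quit name, then the prefix before it is filtered and sliced to MAX_NAMES.
-- outside the precondition, e.g. on filter_names(['a', '']): A raises IndexError, B raises IndexError; on filter_names(['c', 'd', 'e', 'f', 'g', 'h', '']): A returns ['c', 'd', 'e', 'f', 'g'], B raises IndexError; on filter_names(['q', '']): A returns [], B returns []
import Mathlib
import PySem

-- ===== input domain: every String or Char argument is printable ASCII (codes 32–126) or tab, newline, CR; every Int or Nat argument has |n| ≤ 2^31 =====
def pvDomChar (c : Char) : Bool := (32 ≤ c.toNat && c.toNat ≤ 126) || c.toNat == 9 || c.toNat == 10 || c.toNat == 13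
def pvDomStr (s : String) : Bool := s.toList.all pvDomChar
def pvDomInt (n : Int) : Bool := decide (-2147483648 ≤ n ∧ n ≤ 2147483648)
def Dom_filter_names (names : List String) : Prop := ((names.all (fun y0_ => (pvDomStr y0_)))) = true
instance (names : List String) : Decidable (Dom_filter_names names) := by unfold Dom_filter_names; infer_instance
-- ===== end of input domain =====

-- B replaces A's single-pass counter loop by two stages: find the cut index of the first
-- non-filtered quit name, then filter that prefix and cap at 5 (alternative decomposition, same cost).
-- Both Pythons are generators; the equivalence is about the yielded sequence (returned list).


-- ===== PORT A =====
-- the loop of A: state = count; '[]' in the 'none' branch is junk (Python raises IndexError there, excluded by Pre_)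
def filterNamesLoopA : List String → Int → List String
  | [], _ => []
  | name :: rest, count =>
    match PySem.Str.pyGet? name 0 with
    | none => []
    | some c0 =>
      if c0 = 'b' then filterNamesLoopA rest count
      else if name.toList.any PySem.Chars.isdigit then filterNamesLoopA rest count
      else if c0 = 'q' then []
      else if count = 5 then []
      else name :: filterNamesLoopA rest (count + 1)

def filter_names (names : List String) : List String := filterNamesLoopA names 0

-- ===== PORT B =====
-- B's keep(name): name[0] not in 'b' and not any(x.isnumeric() for x in name)
-- ('false' in the 'none' branch is junk: Python raises IndexError there, excluded by Pre_)
def pvKeepB (name : String) : Bool :=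
  match PySem.Str.pyGet? name 0 with
  | none => false
  | some c0 => c0 ≠ 'b' && !(name.toList.any PySem.Chars.isdigit)

-- B's quit test: name[0] in 'q'
def pvQuitB (name : String) : Bool :=
  match PySem.Str.pyGet? name 0 with
  | none => false
  | some c0 => c0 = 'q'

-- B's stage-1 loop: index of the first name with keep(name) ∧ quit(name), else len(names)
def pvStopB : List String → Nat
  | [] => 0
  | name :: rest => if pvKeepB name && pvQuitB name then 0 else 1 + pvStopB rest

def filter_names_alt (names : List String) : List String :=
  ((names.take (pvStopB names)).filter pvKeepB).take 5

-- ===== PRECONDITION & SPEC =====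
-- Pre_ excludes lists containing an empty string: there name[0] raises IndexError in both
-- programs when reached (whether a program reaches it before stopping is accidental position-dependent behaviour).
def Pre_filter_names (names : List String) : Prop := ¬ ("" ∈ names)
instance (names : List String) : Decidable (Pre_filter_names names) := by unfold Pre_filter_names; infer_instance
def pvWitness_filter_names : List String := ["al", "b1", "12", "cx", "q", "d"]

def Spec_filter_names (names : List String) (out : List String) : Prop := out = filter_names_alt names
instance (names : List String) (out : List String) : Decidable (Spec_filter_names names out) := by unfold Spec_filter_names; infer_instance

-- ===== CLAIM =====
def Claim_equal_filter_names : Prop := ∀ (names : List String), Dom_filter_names names → Pre_filter_names names → Spec_filter_names names (filter_names names)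

-- ===== LEMMAS AND PROOFS =====
lemma take_one_add {α : Type} (a : α) (l : List α) (n : Nat) :
    List.take (1 + n) (a :: l) = a :: List.take n l := by
  simp [Nat.add_comm, List.take_succ_cons]
lemma pyGet?_zero_ne_empty (s : String) (h : s ≠ "") :
    ∃ c, PySem.List.pyGet? s.toList 0 = some c := by
  have hl : s.toList ≠ [] := by
    intro hc
    exact h (String.toList_inj.mp (by simp [hc]))
  cases hlist : s.toList with
  | nil => exact absurd hlist hl
  | cons c cs => exact ⟨c, by simp⟩

lemma loopA_eq (names : List String) :
    ∀ count : Int, 0 ≤ count → count ≤ 5 → Pre_filter_names names →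
      filterNamesLoopA names count =
        (((names.take (pvStopB names)).filter pvKeepB).take (5 - count).toNat) := by
  induction names with
  | nil => intro count _ _ _; simp [filterNamesLoopA, pvStopB]
  | cons name rest ih =>
      intro count h0 h5 hpre
      have hne : name ≠ "" := by
        intro h; exact hpre (by simp [h])
      have hpre' : Pre_filter_names rest := by
        intro h; exact hpre (List.mem_cons_of_mem _ h)
      obtain ⟨c0, hc0⟩ := pyGet?_zero_ne_empty name hne
      by_cases hb : c0 = 'b'
      · have hk : pvKeepB name = false := by simp [pvKeepB, PySem.Str.pyGet?, hc0, hb]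
        simp [filterNamesLoopA, PySem.Str.pyGet?, hc0, hb, pvStopB, hk,
          take_one_add, ih count h0 h5 hpre']
      · by_cases hnum : name.toList.any PySem.Chars.isdigit
        · have hk : pvKeepB name = false := by simp [pvKeepB, PySem.Str.pyGet?, hc0, hnum]
          simp [filterNamesLoopA, PySem.Str.pyGet?, hc0, hb, hnum, pvStopB, hk,
            take_one_add, ih count h0 h5 hpre']
        · have hkeep : pvKeepB name = true := by
            simp [pvKeepB, PySem.Str.pyGet?, hc0, hb, hnum]
          by_cases hq : c0 = 'q'
          · have hquit : pvQuitB name = true := by simp [pvQuitB, PySem.Str.pyGet?, hc0, hq]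
            simp [filterNamesLoopA, PySem.Str.pyGet?, hc0, hnum, hq, pvStopB, hkeep, hquit]
          · have hquit : pvQuitB name = false := by simp [pvQuitB, PySem.Str.pyGet?, hc0, hq]
            by_cases hcnt : count = 5
            · simp [filterNamesLoopA, PySem.Str.pyGet?, hc0, hb, hnum, hq, hcnt, pvStopB,
                hkeep, hquit]
            · have hrec := ih (count + 1) (by omega) (by omega) hpre'
              have hsub : (5 - count).toNat = (5 - (count + 1)).toNat + 1 := by omega
              simp [filterNamesLoopA, PySem.Str.pyGet?, hc0, hb, hnum, hq, hcnt, pvStopB,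
                hkeep, hquit, hrec, hsub, take_one_add, List.take_succ_cons]

-- ===== VERDICT =====
theorem filter_names_spec : Claim_equal_filter_names := by
  intro names _ hpre
  show filter_names names = filter_names_alt names
  have h := loopA_eq names 0 (by omega) (by omega) hpre
  simpa [filter_names, filter_names_alt] using h
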